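-- pv_equiv track=rewrite | github.com/CryptoCOB/STONEMASONRY.ca | simcoe-stone-frontend/scripts/lead_engine/osm_contractors_scraper.py | extract_socials
-- ===== SOURCE A (Python) =====
-- from typing import Dict, Any, List, Optional
--
-- def extract_socials(tags: Dict[str, Any]) -> Dict[str, str]:
--     socials_keys = [
--         "facebook", "contact:facebook", "instagram", "contact:instagram",
--         "twitter", "contact:twitter", "linkedin", "contact:linkedin",
--         "youtube", "contact:youtube", "tikTok", "contact:tiktok", "contact:social"
--     ]
--     out = {}
--     for k in socials_keys:
--         if k in tags and tags[k]:
--             out[k] = tags[k]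
--     return out
-- ===== SOURCE B (Python) =====
-- _SOCIAL_KEYS = [
--     "facebook", "contact:facebook", "instagram", "contact:instagram",
--     "twitter", "contact:twitter", "linkedin", "contact:linkedin",
--     "youtube", "contact:youtube", "tikTok", "contact:tiktok", "contact:social",
-- ]
--
-- def extract_socials(tags):
--     # One pass over the tags: drop each truthy social value into a positional
--     # slot table indexed by the key's canonical position, then read it off.
--     slots = [None] * len(_SOCIAL_KEYS)
--     for k, v in tags.items():
--         try:
--             i = _SOCIAL_KEYS.index(k)
--         except ValueError:
--             continue
--         if v:
--             slots[i] = v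
--     return {k: v for k, v in zip(_SOCIAL_KEYS, slots) if v is not None}
-- ===== Notes on version B (the rewrite author's own statement) =====
-- stated objective: alternative
-- what changed: Instead of probing the tags dict key-by-key, B makes one pass over tags.items(), writing each truthy social value into a positional slot table indexed by the key's canonical position, and reads the result off the slots via zip.
import Mathlib
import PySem

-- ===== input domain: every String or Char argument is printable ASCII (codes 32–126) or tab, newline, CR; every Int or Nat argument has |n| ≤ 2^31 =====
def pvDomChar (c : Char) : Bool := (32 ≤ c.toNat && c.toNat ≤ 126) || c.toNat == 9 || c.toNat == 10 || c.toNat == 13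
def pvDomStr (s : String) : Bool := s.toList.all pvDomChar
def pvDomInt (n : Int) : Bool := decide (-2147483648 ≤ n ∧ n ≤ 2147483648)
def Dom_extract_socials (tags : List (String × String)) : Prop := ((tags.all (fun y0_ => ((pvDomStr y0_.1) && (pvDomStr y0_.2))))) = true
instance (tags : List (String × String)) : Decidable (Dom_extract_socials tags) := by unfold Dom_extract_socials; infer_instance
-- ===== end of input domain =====

-- B makes one pass over the tags, writing each truthy social value into a positional slot
-- table indexed by the key's canonical position, then reads the result off with zip;
-- A probes the tags dict key-by-key. Same return value on duplicate-free inputs.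


-- ===== PORT A =====
-- the literal socials_keys list of A
def pvKeysA : List String :=
  ["facebook", "contact:facebook", "instagram", "contact:instagram",
   "twitter", "contact:twitter", "linkedin", "contact:linkedin",
   "youtube", "contact:youtube", "tikTok", "contact:tiktok", "contact:social"]

-- 'k in tags' / 'tags[k]' on the dict-as-association-list: first-match lookup
def pvLookup? (tags : List (String × String)) (k : String) : Option String :=
  (tags.find? (fun p => p.1 == k)).map (fun p => p.2)

def extract_socials (tags : List (String × String)) : List (String × String) :=
  (pvKeysA.foldl (fun (out : PySem.Dict String String) k =>
      match pvLookup? tags k with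
      | some v => if v != "" then out.insert k v else out
      | none => out)
    PySem.Dict.empty).items

-- ===== PORT B =====
-- the _SOCIAL_KEYS list of B
def pvKeysB : List String :=
  ["facebook", "contact:facebook", "instagram", "contact:instagram",
   "twitter", "contact:twitter", "linkedin", "contact:linkedin",
   "youtube", "contact:youtube", "tikTok", "contact:tiktok", "contact:social"]

-- the loop body: i = _SOCIAL_KEYS.index(k) (ValueError → skip); if v: slots[i] = v
def pvSlotsStep (slots : List (Option String)) (p : String × String) : List (Option String) :=
  match PySem.List.index? pvKeysB p.1 with
  | some i => if p.2 != "" then slots.set i (some p.2) else slots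
  | none => slots

def extract_socials_alt (tags : List (String × String)) : List (String × String) :=
  -- slots = [None] * len(_SOCIAL_KEYS); for k, v in tags.items(): …
  let slots := tags.foldl pvSlotsStep (List.replicate pvKeysB.length none)
  -- {k: v for k, v in zip(_SOCIAL_KEYS, slots) if v is not None}
  (pvKeysB.zip slots).filterMap (fun kv => kv.2.map (fun v => (kv.1, v)))

-- ===== PRECONDITION & SPEC =====
-- Pre_ excludes association lists with duplicate keys: they represent no Python dict input
-- (a Python dict always has distinct keys), and on them first-binding vs last-binding lookup
-- is a pure artefact of the list encoding.
def Pre_extract_socials (tags : List (String × String)) : Prop :=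
  (tags.map Prod.fst).Nodup
instance (tags : List (String × String)) : Decidable (Pre_extract_socials tags) := by
  unfold Pre_extract_socials; infer_instance

def pvWitness_extract_socials : (List (String × String)) :=
  [("facebook", "fb.com/x"), ("name", "Acme"), ("instagram", "")]

def Spec_extract_socials (tags : List (String × String)) (out : List (String × String)) : Prop := out = extract_socials_alt tags
instance (tags : List (String × String)) (out : List (String × String)) : Decidable (Spec_extract_socials tags out) := by unfold Spec_extract_socials; infer_instance

-- ===== CLAIM (what is proved, stated in full; the proofs are below) =====
def Claim_equal_extract_socials : Prop := ∀ (tags : List (String × String)), Dom_extract_socials tags → Pre_extract_socials tags → Spec_extract_socials tags (extract_socials tags)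

-- ===== LEMMAS AND PROOFS =====

-- the common value the two ports compute at a canonical key
def pvVal (tags : List (String × String)) (k : String) : Option String :=
  match pvLookup? tags k with
  | some v => if v != "" then some v else none
  | none => none

theorem pvLookup?_none_of_not_mem (tags : List (String × String)) (k : String)
    (h : k ∉ tags.map Prod.fst) : pvLookup? tags k = none := by
  unfold pvLookup?
  rw [List.find?_eq_none.mpr]
  · rfl
  · intro p hp hq
    exact h (List.mem_map.mpr ⟨p, hp, by simpa using hq⟩)

theorem pvLookup?_cons (p : String × String) (rest : List (String × String)) (k : String) :
    pvLookup? (p :: rest) k = if p.1 == k then some p.2 else pvLookup? rest k := by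
  unfold pvLookup?
  rw [List.find?_cons]
  cases h : (p.1 == k)
  · simp
  · simp

-- A-side: the canonical-key fold appends one item per truthy-present key
theorem pvA_items (tags : List (String × String)) (ks : List String) (hnd : ks.Nodup)
    (d : PySem.Dict String String) (hdisj : ∀ k ∈ ks, d.contains k = false) :
    (ks.foldl (fun (out : PySem.Dict String String) k =>
        match pvLookup? tags k with
        | some v => if v != "" then out.insert k v else out
        | none => out) d).items
      = d.items ++ ks.filterMap (fun k => (pvVal tags k).map (fun v => (k, v))) := by
  induction ks generalizing d with
  | nil => simp
  | cons k ks ih =>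
    obtain ⟨hknotin, hks⟩ := by simpa using hnd
    simp only [List.foldl_cons, List.filterMap_cons]
    have hdk : d.contains k = false := hdisj k (by simp)
    cases hl : pvLookup? tags k with
    | none =>
      rw [ih hks d (fun k' hk' => hdisj k' (by simp [hk']))]
      simp [pvVal, hl]
    | some v =>
      by_cases hv : (v != "") = true
      · have hstep : ∀ k' ∈ ks, (d.insert k v).contains k' = false := by
          intro k' hk'
          rw [PySem.Dict.contains_insert]
          have : k' ≠ k := fun h => hknotin (h ▸ hk')
          simp [this, hdisj k' (by simp [hk'])]
        simp only [hv, if_true]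
        rw [ih hks (d.insert k v) hstep]
        simp [PySem.Dict.items_insert, hdk, pvVal, hl, hv]
      · simp only [hv, Bool.false_eq_true, if_false]
        rw [ih hks d (fun k' hk' => hdisj k' (by simp [hk']))]
        simp [pvVal, hl, hv]

-- the loop body preserves the slot-table length
theorem pvSlotsStep_length (s : List (Option String)) (p : String × String) :
    (pvSlotsStep s p).length = s.length := by
  unfold pvSlotsStep
  cases PySem.List.index? pvKeysB p.1 with
  | none => rfl
  | some j => split_ifs <;> simp

theorem pvFold_length (tags : List (String × String)) (s : List (Option String)) :
    (tags.foldl pvSlotsStep s).length = s.length := by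
  induction tags generalizing s with
  | nil => rfl
  | cons p rest ih => rw [List.foldl_cons, ih, pvSlotsStep_length]

-- index? at a canonical key hits its own position (pvKeysB has no duplicates)
theorem pvIndex?_keysB (i : Nat) (hi : i < 13) :
    PySem.List.index? pvKeysB (pvKeysB.getD i "") = some i := by
  interval_cases i <;> decide

-- B-side: what each slot holds after the one pass, given distinct tag keys
theorem pvSlot_get (tags : List (String × String)) (hnd : (tags.map Prod.fst).Nodup)
    (slots : List (Option String)) (hlen : slots.length = pvKeysB.length)
    (i : Nat) (hi : i < pvKeysB.length) :
    (tags.foldl pvSlotsStep slots)[i]? =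
      match pvLookup? tags (pvKeysB[i]) with
      | some v => if v != "" then some (some v) else slots[i]?
      | none => slots[i]? := by
  induction tags generalizing slots with
  | nil => simp [pvLookup?]
  | cons p rest ih =>
    obtain ⟨hnotin, hrest⟩ := by simpa using hnd
    have hlen' : (pvSlotsStep slots p).length = pvKeysB.length := by
      rw [pvSlotsStep_length, hlen]
    rw [List.foldl_cons, pvLookup?_cons, ih hrest _ hlen']
    by_cases hk : p.1 = pvKeysB[i]
    · have hlrest : pvLookup? rest (pvKeysB[i]) = none :=
        pvLookup?_none_of_not_mem rest _ (by rw [← hk]; simpa using hnotin)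
      rw [hlrest]
      simp only [hk, beq_self_eq_true, if_true]
      unfold pvSlotsStep
      rw [hk, show pvKeysB[i] = pvKeysB.getD i "" from (List.getD_eq_getElem _ _ hi).symm,
        pvIndex?_keysB i (by simpa [pvKeysB] using hi)]
      by_cases hv : (p.2 != "") = true
      · simp [hv, hlen, hi]
      · simp [hv]
    · have hne : (p.1 == pvKeysB[i]) = false := by simpa using hk
      rw [hne]
      simp only [Bool.false_eq_true, if_false]
      have hsame : (pvSlotsStep slots p)[i]? = slots[i]? := by
        unfold pvSlotsStep
        cases hidx : PySem.List.index? pvKeysB p.1 with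
        | none => rfl
        | some j =>
          obtain ⟨hj, hj1, -⟩ := PySem.List.getElem_of_index?_eq_some hidx
          have hji : j ≠ i := by
            intro h
            subst h
            exact hk hj1.symm
          by_cases hv : (p.2 != "") = true
          · simp only [hv, if_true]
            exact List.getElem?_set_ne hji
          · simp [hv]
      rw [hsame]

-- B-side: the slot table equals the canonical map of pvVal
theorem pvSlots_eq (tags : List (String × String)) (hnd : (tags.map Prod.fst).Nodup) :
    tags.foldl pvSlotsStep (List.replicate pvKeysB.length none)
      = pvKeysB.map (pvVal tags) := by
  apply List.ext_getElem?
  intro i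
  by_cases hi : i < pvKeysB.length
  · rw [pvSlot_get tags hnd (List.replicate pvKeysB.length none) (by simp) i hi,
      List.getElem?_map, List.getElem?_eq_getElem hi]
    simp only [List.getElem?_replicate, hi, if_true, Option.map_some]
    unfold pvVal
    cases hl : pvLookup? tags pvKeysB[i] with
    | none => simp
    | some v =>
      by_cases hv : (v != "") = true <;> simp [hv]
  · rw [List.getElem?_eq_none (by rw [pvFold_length]; simpa using hi),
      List.getElem?_eq_none (by simpa using hi)]

-- ===== VERDICT (by name: the statement is the Claim_ definition above) =====
theorem extract_socials_spec : Claim_equal_extract_socials := by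
  intro tags _ hpre
  unfold Spec_extract_socials extract_socials extract_socials_alt
  rw [pvA_items tags pvKeysA (by decide) PySem.Dict.empty (by intro k _; rfl)]
  rw [show pvKeysA = pvKeysB from rfl, pvSlots_eq tags hpre]
  have hzip : pvKeysB.zip (pvKeysB.map (pvVal tags))
      = pvKeysB.map (fun k => (k, pvVal tags k)) := by
    simpa using @List.zip_map' _ _ _ id (pvVal tags) pvKeysB
  simp only [hzip, List.filterMap_map]
  simp [Function.comp, PySem.Dict.empty]
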